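-- pv_equiv track=rewrite | github.com/ummayhanijaved/vqa_gi_thesis | src/eval_route1_fuzzy.py | semantic_equivalent
-- ===== SOURCE A (Python) =====
-- SEMANTIC_GROUPS = [
--     # Colonoscopy concept
--     ["colonoscopy", "colonoscopic examination", "colonoscopic procedure",
--      "colonoscopy procedure", "colonoscope", "colonoscopy performed"],
--     # Gastroscopy concept
--     ["gastroscopy", "gastroscopic examination", "gastroscopic procedure",
--      "gastroscopy procedure", "gastroscope", "upper endoscopy"],
--     # Text on image concept
--     ["text present", "text is present", "text observed", "text visible",
--      "textual content", "text on image", "text on the image",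
--      "visible text"],
--     # No text concept
--     ["no text", "no visible text", "no text observed", "absent text",
--      "text not observed", "no textual"],
--     # Polyp presence
--     ["polyp present", "polyp identified", "polyp observed", "polyp detected",
--      "polyp visible", "polyp found"],
--     # Esophageal inflammation
--     ["esophageal inflammation", "esophagitis", "esophageal inflammatory",
--      "inflammation of esophagus"],
--     # Ulcerative colitis
--     ["ulcerative colitis", "colitis", "uc", "inflammatory bowel"],
--     # Paris polyp classifications
--     ["paris-type polyp", "paris type polyp", "paris classification",
--      "paris iia", "paris is"],
--     # Residual polyps
--     ["residual polyps", "some polyps remain", "polyps remain",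
--      "not all polyps", "polyps left"],
--     # Tube visible
--     ["tube visible", "tube seen", "tube present", "tube identified"],
--     # No artifacts
--     ["no box-like", "no artifacts", "no box artifacts", "no green and black"],
--     # Size descriptions
--     ["5 to 10", "5-10", "between 5 and 10"],
--     # One finding
--     ["one abnormal", "single abnormal", "1 abnormal", "one finding"],
-- ]
--
-- def semantic_equivalent(pred: str, gt: str) -> bool:
--     """Check if both strings refer to the same semantic group."""
--     p_low = pred.lower().strip()
--     g_low = gt.lower().strip()
--     for group in SEMANTIC_GROUPS:
--         p_hit = any(phrase in p_low for phrase in group)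
--         g_hit = any(phrase in g_low for phrase in group)
--         if p_hit and g_hit:
--             # Additional negation check — don't match if one has "no" and other doesn't
--             p_neg = any(n in p_low for n in ["no ", "not ", "absent", "without"])
--             g_neg = any(n in g_low for n in ["no ", "not ", "absent", "without"])
--             if p_neg != g_neg:
--                 return False
--             return True
--     return False
-- ===== SOURCE B (Python) =====
-- SEMANTIC_GROUPS = [
--     # Colonoscopy concept
--     ["colonoscopy", "colonoscopic examination", "colonoscopic procedure",
--      "colonoscopy procedure", "colonoscope", "colonoscopy performed"],
--     # Gastroscopy concept
--     ["gastroscopy", "gastroscopic examination", "gastroscopic procedure",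
--      "gastroscopy procedure", "gastroscope", "upper endoscopy"],
--     # Text on image concept
--     ["text present", "text is present", "text observed", "text visible",
--      "textual content", "text on image", "text on the image",
--      "visible text"],
--     # No text concept
--     ["no text", "no visible text", "no text observed", "absent text",
--      "text not observed", "no textual"],
--     # Polyp presence
--     ["polyp present", "polyp identified", "polyp observed", "polyp detected",
--      "polyp visible", "polyp found"],
--     # Esophageal inflammation
--     ["esophageal inflammation", "esophagitis", "esophageal inflammatory",
--      "inflammation of esophagus"],
--     # Ulcerative colitis
--     ["ulcerative colitis", "colitis", "uc", "inflammatory bowel"],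
--     # Paris polyp classifications
--     ["paris-type polyp", "paris type polyp", "paris classification",
--      "paris iia", "paris is"],
--     # Residual polyps
--     ["residual polyps", "some polyps remain", "polyps remain",
--      "not all polyps", "polyps left"],
--     # Tube visible
--     ["tube visible", "tube seen", "tube present", "tube identified"],
--     # No artifacts
--     ["no box-like", "no artifacts", "no box artifacts", "no green and black"],
--     # Size descriptions
--     ["5 to 10", "5-10", "between 5 and 10"],
--     # One finding
--     ["one abnormal", "single abnormal", "1 abnormal", "one finding"],
-- ]
--
-- NEGATIONS = ["no ", "not ", "absent", "without"]
--
--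
-- def semantic_equivalent(pred: str, gt: str) -> bool:
--     """Check if both strings refer to the same semantic group."""
--     p_low = pred.lower().strip()
--     g_low = gt.lower().strip()
--     p_idx = {i for i, group in enumerate(SEMANTIC_GROUPS)
--              if any(phrase in p_low for phrase in group)}
--     g_idx = {i for i, group in enumerate(SEMANTIC_GROUPS)
--              if any(phrase in g_low for phrase in group)}
--     p_neg = any(n in p_low for n in NEGATIONS)
--     g_neg = any(n in g_low for n in NEGATIONS)
--     return bool(p_idx & g_idx) and p_neg == g_neg
-- ===== Notes on version B (the rewrite author's own statement) =====
-- stated objective: alternative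
-- what changed: Replaces the interleaved early-return loop (scan groups, on the first group hit by both strings decide via an inline negation test) with a set-based decomposition: build the set of group indices each string matches via enumerate-comprehensions, factor the negation test out once per string, and return one final boolean 'index sets intersect AND negation flags equal'.
import Mathlib
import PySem

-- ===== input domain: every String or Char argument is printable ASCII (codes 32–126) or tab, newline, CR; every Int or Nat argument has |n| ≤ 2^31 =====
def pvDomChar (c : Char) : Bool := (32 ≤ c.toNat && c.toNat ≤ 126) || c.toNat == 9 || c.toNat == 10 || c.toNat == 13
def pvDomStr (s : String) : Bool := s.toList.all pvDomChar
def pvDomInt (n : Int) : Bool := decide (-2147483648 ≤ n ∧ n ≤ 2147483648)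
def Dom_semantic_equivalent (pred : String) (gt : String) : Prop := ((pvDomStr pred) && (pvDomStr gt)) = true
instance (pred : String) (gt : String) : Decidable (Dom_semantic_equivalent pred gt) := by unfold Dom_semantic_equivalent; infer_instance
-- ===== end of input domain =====

-- B replaces A's early-return scan over SEMANTIC_GROUPS by a set decomposition: the sets of
-- group indices each string matches, intersected, combined with one factored-out negation check
-- ("alternative": same cost, different structure).


def SEMANTIC_GROUPS : List (List String) := [
  ["colonoscopy", "colonoscopic examination", "colonoscopic procedure",
   "colonoscopy procedure", "colonoscope", "colonoscopy performed"],
  ["gastroscopy", "gastroscopic examination", "gastroscopic procedure",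
   "gastroscopy procedure", "gastroscope", "upper endoscopy"],
  ["text present", "text is present", "text observed", "text visible",
   "textual content", "text on image", "text on the image",
   "visible text"],
  ["no text", "no visible text", "no text observed", "absent text",
   "text not observed", "no textual"],
  ["polyp present", "polyp identified", "polyp observed", "polyp detected",
   "polyp visible", "polyp found"],
  ["esophageal inflammation", "esophagitis", "esophageal inflammatory",
   "inflammation of esophagus"],
  ["ulcerative colitis", "colitis", "uc", "inflammatory bowel"],
  ["paris-type polyp", "paris type polyp", "paris classification",
   "paris iia", "paris is"],
  ["residual polyps", "some polyps remain", "polyps remain",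
   "not all polyps", "polyps left"],
  ["tube visible", "tube seen", "tube present", "tube identified"],
  ["no box-like", "no artifacts", "no box artifacts", "no green and black"],
  ["5 to 10", "5-10", "between 5 and 10"],
  ["one abnormal", "single abnormal", "1 abnormal", "one finding"]]

-- ===== PORT A =====
-- A's for-loop with its two early returns, as structural recursion over the group list
def semEqLoop (p_low g_low : String) : List (List String) → Bool
  | [] => false
  | group :: rest =>
    let p_hit := group.any (fun phrase => PySem.Str.isIn phrase p_low)
    let g_hit := group.any (fun phrase => PySem.Str.isIn phrase g_low)
    if p_hit && g_hit then
      let p_neg := ["no ", "not ", "absent", "without"].any (fun n => PySem.Str.isIn n p_low)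
      let g_neg := ["no ", "not ", "absent", "without"].any (fun n => PySem.Str.isIn n g_low)
      if p_neg != g_neg then false else true
    else semEqLoop p_low g_low rest

def semantic_equivalent (pred : String) (gt : String) : Bool :=
  let p_low := PySem.Str.strip (PySem.Str.lower pred)
  let g_low := PySem.Str.strip (PySem.Str.lower gt)
  semEqLoop p_low g_low SEMANTIC_GROUPS

-- ===== PORT B =====
def NEGATIONS : List String := ["no ", "not ", "absent", "without"]

-- the set comprehension {i for i, group in enumerate(gs) if any(phrase in s for phrase in group)}
def hitIdx (s : String) (gs : List (List String)) : PySem.Set Int :=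
  PySem.Set.ofList
    (((PySem.List.enumerate gs 0).filter
        (fun ig => ig.2.any (fun phrase => PySem.Str.isIn phrase s))).map (fun ig => ig.1))

def semantic_equivalent_alt (pred : String) (gt : String) : Bool :=
  let p_low := PySem.Str.strip (PySem.Str.lower pred)
  let g_low := PySem.Str.strip (PySem.Str.lower gt)
  let p_idx := hitIdx p_low SEMANTIC_GROUPS
  let g_idx := hitIdx g_low SEMANTIC_GROUPS
  let p_neg := NEGATIONS.any (fun n => PySem.Str.isIn n p_low)
  let g_neg := NEGATIONS.any (fun n => PySem.Str.isIn n g_low)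
  (!(PySem.Set.inter p_idx g_idx).isEmpty) && (p_neg == g_neg)

-- ===== PRECONDITION & SPEC =====
def Spec_semantic_equivalent (pred : String) (gt : String) (out : Bool) : Prop := out = semantic_equivalent_alt pred gt
instance (pred : String) (gt : String) (out : Bool) : Decidable (Spec_semantic_equivalent pred gt out) := by unfold Spec_semantic_equivalent; infer_instance

-- ===== CLAIM (what is proved, stated in full; the proofs are below) =====
def Claim_equal_semantic_equivalent : Prop := ∀ (pred : String) (gt : String), Dom_semantic_equivalent pred gt → Spec_semantic_equivalent pred gt (semantic_equivalent pred gt)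

-- ===== LEMMAS AND PROOFS =====

-- membership in the comprehension set, characterized by group index
lemma mem_hitIdx (s : String) (gs : List (List String)) (i : Int) :
    i ∈ hitIdx s gs ↔ ∃ (k : Nat) (h : k < gs.length),
      i = (k : Int) ∧ gs[k].any (fun phrase => PySem.Str.isIn phrase s) = true := by
  unfold hitIdx
  rw [PySem.Set.mem_ofList]
  simp only [List.mem_map, List.mem_filter, PySem.List.mem_enumerate_iff]
  constructor
  · rintro ⟨⟨j, grp⟩, ⟨⟨k, hk, hpair⟩, hhit⟩, rfl⟩
    rw [Prod.mk.injEq] at hpair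
    refine ⟨k, hk, by simp [hpair.1], ?_⟩
    rw [← hpair.2]
    exact hhit
  · rintro ⟨k, hk, rfl, hhit⟩
    exact ⟨((k : Int), gs[k]), ⟨⟨k, hk, by simp⟩, hhit⟩, rfl⟩

lemma inter_hitIdx_eq_any (p g : String) (gs : List (List String)) :
    (!(PySem.Set.inter (hitIdx p gs) (hitIdx g gs)).isEmpty)
      = gs.any (fun grp => grp.any (fun phrase => PySem.Str.isIn phrase p)
                        && grp.any (fun phrase => PySem.Str.isIn phrase g)) := by
  rw [Bool.eq_iff_iff, Bool.not_eq_true', List.isEmpty_eq_false_iff, List.any_eq_true,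
    ← List.isEmpty_eq_false_iff, List.isEmpty_eq_false_iff_exists_mem]
  constructor
  · rintro ⟨i, hi⟩
    rw [PySem.Set.mem_inter, mem_hitIdx, mem_hitIdx] at hi
    obtain ⟨⟨k, hk, rfl, hp⟩, ⟨k', hk', hkk', hg⟩⟩ := hi
    have hke : k = k' := by exact_mod_cast hkk'
    subst hke
    exact ⟨gs[k], List.getElem_mem hk, by rw [Bool.and_eq_true]; exact ⟨hp, hg⟩⟩
  · rintro ⟨grp, hmem, hb⟩
    obtain ⟨k, hk, rfl⟩ := List.mem_iff_getElem.mp hmem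
    refine ⟨(k : Int), ?_⟩
    rw [PySem.Set.mem_inter, mem_hitIdx, mem_hitIdx]
    rw [Bool.and_eq_true] at hb
    exact ⟨⟨k, hk, rfl, hb.1⟩, ⟨k, hk, rfl, hb.2⟩⟩

-- A's loop = "some group hit by both" && "negation flags agree"
lemma semEqLoop_eq (p g : String) (gs : List (List String)) :
    semEqLoop p g gs
      = ((gs.any (fun grp => grp.any (fun phrase => PySem.Str.isIn phrase p)
                         && grp.any (fun phrase => PySem.Str.isIn phrase g)))
        && ((["no ", "not ", "absent", "without"].any (fun n => PySem.Str.isIn n p))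
             == (["no ", "not ", "absent", "without"].any (fun n => PySem.Str.isIn n g)))) := by
  induction gs with
  | nil => rfl
  | cons grp rest ih =>
    rw [semEqLoop]
    by_cases h : (grp.any (fun phrase => PySem.Str.isIn phrase p)
                  && grp.any (fun phrase => PySem.Str.isIn phrase g)) = true
    · simp only [h, Bool.true_or, Bool.true_and, if_true,
        List.any_cons, List.any_nil, Bool.or_false]
      cases h1 : PySem.Str.isIn "no " p <;>
      cases h2 : PySem.Str.isIn "not " p <;>
      cases h3 : PySem.Str.isIn "absent" p <;>
      cases h4 : PySem.Str.isIn "without" p <;>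
      cases h5 : PySem.Str.isIn "no " g <;>
      cases h6 : PySem.Str.isIn "not " g <;>
      cases h7 : PySem.Str.isIn "absent" g <;>
      cases h8 : PySem.Str.isIn "without" g <;> rfl
    · rw [Bool.not_eq_true] at h
      rw [h]
      simp only [Bool.false_eq_true, if_false]
      rw [List.any_cons, h, Bool.false_or]
      exact ih

-- ===== VERDICT (by name: the statement is the Claim_ definition above) =====
theorem semantic_equivalent_spec : Claim_equal_semantic_equivalent := by
  intro pred gt _
  unfold Spec_semantic_equivalent semantic_equivalent semantic_equivalent_alt NEGATIONS
  rw [semEqLoop_eq, ← inter_hitIdx_eq_any]
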